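-- pv_equiv track=rewrite | github.com/taylorreece/code_competitions | facebook-hacker-cup/2016/Round1/problem1/solution.py | solve
-- ===== SOURCE A (Python) =====
-- def solve(days):
-- 	total = 0
-- 	options = []
-- 	for i in range(len(days)):
-- 		options += days[i]
-- 		total += min(options)
-- 		options.remove(min(options))
-- 	return total
-- ===== SOURCE B (Python) =====
-- def solve(days):
--     # Pool of options kept as a list sorted DESCENDING: each new option is
--     # placed by binary search, and the day's minimum is popped from the end.
--     total = 0
--     opts = []  # always sorted descending; current minimum is opts[-1]
--     for day in days:
--         for x in day:
--             lo, hi = 0, len(opts)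
--             while lo < hi:
--                 mid = (lo + hi) // 2
--                 if opts[mid] > x:
--                     lo = mid + 1
--                 else:
--                     hi = mid
--             opts.insert(lo, x)
--         total += opts.pop()
--     return total
-- ===== Notes on version B (the rewrite author's own statement) =====
-- stated objective: alternative
-- what changed: Instead of re-scanning the growing pool twice per day (min() then remove()), B keeps the pool as a sorted list, inserting each new option at its sorted position and popping the front element as the day's minimum.
import Mathlib
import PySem

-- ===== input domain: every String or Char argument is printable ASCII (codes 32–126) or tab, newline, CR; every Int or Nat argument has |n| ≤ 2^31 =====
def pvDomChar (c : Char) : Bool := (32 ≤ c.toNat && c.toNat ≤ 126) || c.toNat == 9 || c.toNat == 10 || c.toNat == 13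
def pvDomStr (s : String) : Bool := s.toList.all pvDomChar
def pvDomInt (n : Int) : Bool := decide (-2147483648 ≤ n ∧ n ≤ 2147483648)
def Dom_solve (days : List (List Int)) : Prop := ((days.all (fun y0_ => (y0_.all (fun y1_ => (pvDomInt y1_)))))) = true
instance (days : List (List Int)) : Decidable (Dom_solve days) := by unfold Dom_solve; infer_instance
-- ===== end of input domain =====

-- B keeps the option pool as a list sorted descending (binary-search insert, pop the
-- day's minimum from the end) instead of A's per-day min() scan plus remove() scan.

-- ===== PORT A =====
-- one iteration of A's loop body: options += days[i]; total += min(options); options.remove(min(options))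
def stepA (st : Int × List Int) (d : List Int) : Int × List Int :=
  let options := st.2 ++ d
  match PySem.List.min? options (fun x => x) with
  | none => (st.1, options)   -- Python raises ValueError here (excluded by Pre_solve)
  | some m => (st.1 + m, (PySem.List.remove? options m).getD options)

def solve (days : List (List Int)) : Int :=
  (days.foldl stepA (0, [])).1

-- ===== PORT B =====
-- B's while loop: binary search for the insertion point in the descending list
-- (lo, hi move exactly as in the Python; opts[mid] is in range whenever consulted,
-- so getD's default is never used)
def bfind (opts : List Int) (x : Int) (lo hi : Nat) : Nat :=
  if lo < hi then
    if opts.getD ((lo + hi) / 2) 0 > x then bfind opts x ((lo + hi) / 2 + 1) hi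
    else bfind opts x lo ((lo + hi) / 2)
  else lo
termination_by hi - lo
decreasing_by all_goals omega

-- one iteration of B's loop body: binary-insert each option of the day, then opts.pop()
def stepB (st : Int × List Int) (d : List Int) : Int × List Int :=
  let opts := d.foldl (fun acc x =>
    PySem.List.insert acc ((bfind acc x 0 acc.length : Nat) : Int) x) st.2
  match PySem.List.pop? opts with
  | none => (st.1, opts)      -- Python raises IndexError here (excluded by Pre_solve)
  | some (m, rest) => (st.1 + m, rest)

def solve_alt (days : List (List Int)) : Int :=
  (days.foldl stepB (0, [])).1

-- ===== PRECONDITION & SPEC =====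
-- Pre_ excludes exactly the inputs where A raises ValueError (min of an empty pool):
-- by day i the pool must have received at least i+1 options in total.
def Pre_solve (days : List (List Int)) : Prop :=
  ∀ i, i < days.length → i + 1 ≤ ((days.take (i+1)).map List.length).sum
instance (days : List (List Int)) : Decidable (Pre_solve days) := by unfold Pre_solve; infer_instance

def pvWitness_solve : List (List Int) := [[3, 1], [], [2]]

def Spec_solve (days : List (List Int)) (out : Int) : Prop := out = solve_alt days
instance (days : List (List Int)) (out : Int) : Decidable (Spec_solve days out) := by unfold Spec_solve; infer_instance

-- ===== CLAIM (what is proved, stated in full; the proofs are below) =====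
def Claim_equal_solve : Prop := ∀ (days : List (List Int)), Dom_solve days → Pre_solve days → Spec_solve days (solve days)

-- ===== LEMMAS AND PROOFS =====

-- PySem.List.insert at an in-range nonnegative index is take/cons/drop
theorem pyInsert_eq (xs : List Int) (v : Int) (k : Nat) (h : k ≤ xs.length) :
    PySem.List.insert xs (k : Int) v = xs.take k ++ v :: xs.drop k := by
  simp only [PySem.List.insert, PySem.List.sliceIndices]
  norm_num
  split_ifs with h1
  · omega
  · have hk : (min (k : Int) (xs.length : Int)).toNat = k := by omega
    rw [hk]

-- the binary search returns a split point of the descending list: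
-- everything before it is > x, everything from it on is ≤ x
theorem bfind_spec (opts : List Int) (x : Int) (hs : opts.Pairwise (· ≥ ·)) :
    ∀ (n lo hi : Nat), hi - lo = n → lo ≤ hi → hi ≤ opts.length →
    (∀ j, j < lo → x < opts.getD j 0) →
    (∀ j, hi ≤ j → j < opts.length → opts.getD j 0 ≤ x) →
    (bfind opts x lo hi ≤ opts.length ∧
     (∀ j, j < bfind opts x lo hi → x < opts.getD j 0) ∧
     (∀ j, bfind opts x lo hi ≤ j → j < opts.length → opts.getD j 0 ≤ x)) := by
  intro n
  induction n using Nat.strong_induction_on with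
  | _ n ih =>
    intro lo hi hn hlohi hhi hbefore hafter
    rw [bfind]
    split
    · rename_i hlt
      have hmono : ∀ p q : Nat, p ≤ q → q < opts.length → opts.getD q 0 ≤ opts.getD p 0 := by
        intro p q hpq hq
        rcases Nat.eq_or_lt_of_le hpq with rfl | hpq'
        · exact le_refl _
        · rw [List.getD_eq_getElem _ _ hq, List.getD_eq_getElem _ _ (lt_trans hpq' hq)]
          exact List.pairwise_iff_getElem.mp hs p q _ _ hpq'
      set mid := (lo + hi) / 2 with hmid
      have hmlt : mid < hi := by omega
      have hmlen : mid < opts.length := lt_of_lt_of_le hmlt hhi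
      split
      · rename_i hgt
        refine ih (hi - (mid + 1)) (by omega) (mid + 1) hi (by omega) (by omega) hhi ?_ hafter
        intro j hj
        exact lt_of_lt_of_le hgt (hmono j mid (by omega) hmlen)
      · rename_i hle
        refine ih (mid - lo) (by omega) lo mid (by omega) (by omega) (by omega) hbefore ?_
        intro j hmj hjlen
        exact le_trans (hmono mid j hmj hjlen) (by omega)
    · rename_i hge
      have : lo = hi := by omega
      subst this
      exact ⟨le_trans hlohi hhi, hbefore, hafter⟩

-- one binary insertion: permutation of x :: acc, and still sorted descending
theorem insStep_perm (acc : List Int) (x : Int) (hs : acc.Pairwise (· ≥ ·)) :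
    (PySem.List.insert acc ((bfind acc x 0 acc.length : Nat) : Int) x).Perm (x :: acc) ∧
    (PySem.List.insert acc ((bfind acc x 0 acc.length : Nat) : Int) x).Pairwise (· ≥ ·) := by
  obtain ⟨hk, hbef, haft⟩ :=
    bfind_spec acc x hs acc.length 0 acc.length rfl (Nat.zero_le _) (le_refl _)
      (by intro j hj; omega) (by intro j h1 h2; omega)
  set k := bfind acc x 0 acc.length with hkdef
  rw [pyInsert_eq acc x k hk]
  constructor
  · refine (List.perm_middle).trans ?_
    rw [List.take_append_drop]
  · rw [List.pairwise_append]
    refine ⟨hs.sublist (List.take_sublist _ _), ?_, ?_⟩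
    · rw [List.pairwise_cons]
      refine ⟨?_, hs.sublist (List.drop_sublist _ _)⟩
      intro b hb
      obtain ⟨i, hi, hbi⟩ := List.mem_iff_getElem.mp hb
      have hlen : (acc.drop k).length = acc.length - k := List.length_drop ..
      have : acc.getD (k + i) 0 ≤ x := haft (k + i) (by omega) (by omega)
      rw [List.getD_eq_getElem _ _ (by omega)] at this
      rw [← hbi, List.getElem_drop]
      exact this
    · intro a ha b hb
      obtain ⟨i, hi, hai⟩ := List.mem_iff_getElem.mp ha
      have hlen : (acc.take k).length = min k acc.length := List.length_take ..
      have hax : x < acc.getD i 0 := hbef i (by omega)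
      rw [List.getD_eq_getElem _ _ (by omega)] at hax
      have ha' : x ≤ a := by
        rw [← hai, List.getElem_take]; omega
      rcases List.mem_cons.mp hb with rfl | hb
      · exact ha'
      · obtain ⟨j, hj, hbj⟩ := List.mem_iff_getElem.mp hb
        have hlen2 : (acc.drop k).length = acc.length - k := List.length_drop ..
        have hbx : acc.getD (k + j) 0 ≤ x := haft (k + j) (by omega) (by omega)
        rw [List.getD_eq_getElem _ _ (by omega)] at hbx
        rw [← hbj, List.getElem_drop]
        have := ha'
        omega

-- folding a day's options through binary insertion: perm of o' ++ d, still descending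
theorem foldl_ins_perm_sorted (d : List Int) : ∀ (o' : List Int), o'.Pairwise (· ≥ ·) →
    ((d.foldl (fun acc x =>
        PySem.List.insert acc ((bfind acc x 0 acc.length : Nat) : Int) x) o').Perm (o' ++ d) ∧
     (d.foldl (fun acc x =>
        PySem.List.insert acc ((bfind acc x 0 acc.length : Nat) : Int) x) o').Pairwise (· ≥ ·)) := by
  induction d with
  | nil => intro o' h; simpa using h
  | cons x xs ih =>
    intro o' h
    simp only [List.foldl_cons]
    obtain ⟨hp1, hs1⟩ := insStep_perm o' x h
    obtain ⟨hp2, hs2⟩ := ih _ hs1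
    refine ⟨hp2.trans ?_, hs2⟩
    refine (hp1.append_right xs).trans ?_
    simpa using (List.perm_middle (a := x) (l₁ := o') (l₂ := xs)).symm

-- Python's min of l, when l is a permutation of a list whose minimum is m
theorem min?_eq_of_perm_min (l l' : List Int) (m : Int)
    (hp : l.Perm l') (hm : m ∈ l') (hmin : ∀ y ∈ l', m ≤ y) :
    PySem.List.min? l (fun x => x) = some m := by
  have hne : l ≠ [] := by
    intro h; subst h; exact (List.not_mem_nil (a := m)) (hp.symm.mem_iff.mp hm)
  cases hm' : PySem.List.min? l (fun x => x) with
  | none => exact absurd ((PySem.List.min?_eq_none_iff l _).mp hm') hne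
  | some m' =>
    have hmem : m' ∈ l' := hp.mem_iff.mp (PySem.List.min?_mem hm')
    have h1 : m ≤ m' := hmin m' hmem
    have h2 : m' ≤ m := by
      have := PySem.List.min?_isMin hm' m (hp.symm.mem_iff.mp hm)
      simpa using this
    congr 1; omega

-- the last element of a nonempty descending list is its minimum
theorem last_is_min (init : List Int) (m : Int)
    (hs : (init ++ [m]).Pairwise (· ≥ ·)) : ∀ y ∈ init ++ [m], m ≤ y := by
  rw [List.pairwise_append] at hs
  intro y hy
  rcases List.mem_append.mp hy with hy | hy
  · exact hs.2.2 y hy m (List.mem_singleton_self m)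
  · rw [List.mem_singleton.mp hy]

-- both loops, step by step: equal totals from permuted pools (B's sorted descending)
theorem loop_eq (ds : List (List Int)) : ∀ (t : Int) (o o' : List Int),
    o.Perm o' → o'.Pairwise (· ≥ ·) →
    (∀ i, i < ds.length → i + 1 ≤ o.length + ((ds.take (i+1)).map List.length).sum) →
    (ds.foldl stepA (t, o)).1 = (ds.foldl stepB (t, o')).1 := by
  induction ds with
  | nil => intro t o o' _ _ _; simp
  | cons d ds' ih =>
    intro t o o' hperm hsort hpre
    obtain ⟨hp1, hs1⟩ := foldl_ins_perm_sorted d o' hsort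
    have hperm1 : (o ++ d).Perm (d.foldl (fun acc x =>
        PySem.List.insert acc ((bfind acc x 0 acc.length : Nat) : Int) x) o') :=
      (hperm.append_right d).trans hp1.symm
    have hlen : 1 ≤ o.length + d.length := by
      have := hpre 0 (by simp)
      simpa using this
    have hne : d.foldl (fun acc x =>
        PySem.List.insert acc ((bfind acc x 0 acc.length : Nat) : Int) x) o' ≠ [] := by
      intro h
      have h2 := hperm1.length_eq
      rw [h, List.length_append] at h2
      simp only [List.length_nil] at h2
      omega
    obtain ⟨init, m, hcons⟩ := List.eq_nil_or_concat _ |>.resolve_left hne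
    rw [List.concat_eq_append] at hcons
    rw [hcons] at hperm1 hs1
    have hmin : PySem.List.min? (o ++ d) (fun x => x) = some m :=
      min?_eq_of_perm_min _ _ m hperm1 (by simp) (last_is_min init m hs1)
    have hmmem : m ∈ o ++ d := hperm1.symm.mem_iff.mp (by simp)
    have hrem : PySem.List.remove? (o ++ d) m = some ((o ++ d).erase m) :=
      PySem.List.remove?_eq_some_erase (o ++ d) m hmmem
    have hstepA : stepA (t, o) d = (t + m, (o ++ d).erase m) := by
      simp [stepA, hmin, hrem]
    have hstepB : stepB (t, o') d = (t + m, init) := by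
      simp only [stepB, hcons, PySem.List.pop?_last]
    simp only [List.foldl_cons, hstepA, hstepB]
    apply ih
    · have hch : (o ++ d).Perm (m :: init) :=
        hperm1.trans (List.perm_append_singleton m init)
      have := hch.erase m
      simpa [List.erase_cons_head] using this
    · rw [List.pairwise_append] at hs1
      exact hs1.1
    · intro i hi
      have h2 := hpre (i+1) (by simpa using Nat.succ_lt_succ hi)
      have hle : ((o ++ d).erase m).length = o.length + d.length - 1 := by
        simp [List.length_erase_of_mem hmmem]
      rw [hle]
      simp only [List.take_succ_cons, List.map_cons, List.sum_cons] at h2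
      omega

-- ===== VERDICT (by name: the statement is the Claim_ definition above) =====
theorem solve_spec : Claim_equal_solve := by
  intro days _ hpre
  unfold Spec_solve solve solve_alt
  refine loop_eq days 0 [] [] (List.Perm.refl _) (by simp) ?_
  intro i hi
  have := hpre i hi
  simpa using this
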